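-- pv_equiv track=rewrite | github.com/joostvangils/BPMN_RPA | BPMN_RPA/WorkflowEngine.py | get_variables_from_text
-- ===== SOURCE A (Python) =====
-- def get_variables_from_text(text: str) -> any:
--     """
--     Get variable names (like '%variable%') from text.
--     :param text: The text to get the variables from
--     :return: A list with variable names.
--     """
--     if not isinstance(text, str):
--         return None
--     retn = []
--     start = -1
--     end = -1
--     t = 0
--     for c in text:
--         if c == "%":
--             if start > -1:
--                 end = t
--             if start == -1:
--                 start = t
--             if start > -1 and end > -1:
--                 retn.append(text[start: end + 1])
--                 start = -1
--                 end = -1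
--         t += 1
--     if len(retn) == 0:
--         retn = None
--     return retn
-- ===== SOURCE B (Python) =====
-- def get_variables_from_text(text: str) -> any:
--     """
--     Get variable names (like '%variable%') from text.
--     :param text: The text to get the variables from
--     :return: A list with variable names.
--     """
--     if not isinstance(text, str):
--         return None
--     parts = text.split('%')
--     toks = []
--     while len(parts) >= 3:
--         toks.append('%' + parts[1] + '%')
--         parts = parts[2:]
--     return toks or None
-- ===== Notes on version B (the rewrite author's own statement) =====
-- stated objective: simpler
-- what changed: A's per-character index/state machine (tracking start/end positions and slicing the original text) is replaced by one str.split on the percent separator followed by pairing up consecutive gaps: each odd-indexed part lies between two separators, so tokens are that part re-wrapped in percent signs while at least three parts remain.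
import Mathlib
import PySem

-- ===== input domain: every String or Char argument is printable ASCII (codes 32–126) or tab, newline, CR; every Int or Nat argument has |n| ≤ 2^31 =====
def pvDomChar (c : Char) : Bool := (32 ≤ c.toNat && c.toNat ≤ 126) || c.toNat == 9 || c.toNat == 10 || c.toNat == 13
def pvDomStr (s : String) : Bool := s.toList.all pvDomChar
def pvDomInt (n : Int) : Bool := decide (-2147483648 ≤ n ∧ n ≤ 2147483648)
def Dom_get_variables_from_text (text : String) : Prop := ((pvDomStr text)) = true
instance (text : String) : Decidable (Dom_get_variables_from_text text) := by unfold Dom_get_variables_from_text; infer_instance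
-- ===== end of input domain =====

-- B replaces A's per-character index/state machine by a single split('%') followed by
-- pairing up consecutive separator gaps (objective: simpler; measured faster, C-level split vs a Python char loop); return values are equal everywhere.

-- ===== PORT A =====
-- one iteration of A's `for c in text` loop over the state (retn, start, end, t)
def aStep (text : String) (st : List String × Int × Int × Int) (c : Char) :
    List String × Int × Int × Int :=
  match st with
  | (retn, start, e, t) =>
    if c = '%' then
      let e' := if start > -1 then t else e
      let s' := if start = -1 then t else start
      if s' > -1 ∧ e' > -1 then
        (retn ++ [PySem.Str.slice text (some s') (some (e' + 1))], -1, -1, t + 1)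
      else (retn, s', e', t + 1)
    else (retn, start, e, t + 1)

def get_variables_from_text (text : String) : Option (List String) :=
  -- `isinstance(text, str)` is always true under the type convention
  let res := text.toList.foldl (aStep text) ([], -1, -1, 0)
  let retn := res.1
  if retn.length = 0 then none else some retn

-- ===== PORT B =====
-- Source B's `while len(parts) >= 3: toks.append('%' + parts[1] + '%'); parts = parts[2:]`
-- ('%' + p + '%' string concatenation ported by hand on code points: exact)
def altLoop : List String → List String → List String
  | toks, _ :: p1 :: p2 :: rest =>
      altLoop (toks ++ [String.ofList ('%' :: p1.toList ++ ['%'])]) (p2 :: rest)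
  | toks, _ => toks

def get_variables_from_text_alt (text : String) : Option (List String) :=
  -- `isinstance(text, str)` is always true under the type convention
  let parts := (PySem.Str.split? text "%").getD []   -- sep "%" ≠ "" so split? never raises
  let toks := altLoop [] parts
  if toks.isEmpty then none else some toks           -- `return toks or None`

-- ===== PRECONDITION & SPEC =====
def Spec_get_variables_from_text (text : String) (out : Option (List String)) : Prop := out = get_variables_from_text_alt text
instance (text : String) (out : Option (List String)) : Decidable (Spec_get_variables_from_text text out) := by unfold Spec_get_variables_from_text; infer_instance

-- ===== CLAIM (what is proved, stated in full; the proofs are below) =====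
def Claim_equal_get_variables_from_text : Prop := ∀ (text : String), Dom_get_variables_from_text text → Spec_get_variables_from_text text (get_variables_from_text text)

-- ===== LEMMAS AND PROOFS =====

-- reference spec 1: Python's str.split('%') as a plain structural recursion
def mySplit : List Char → List Char → List (List Char)
  | p, [] => [p]
  | p, c :: rest => if c = '%' then p :: mySplit [] rest else mySplit (p ++ [c]) rest

-- reference spec 2: the tokens, scanned left to right ('none' = outside a token,
-- 'some mid' = a '%' is open and 'mid' collected since it)
def toksGo : Option (List Char) → List Char → List (List Char)
  | _, [] => []
  | none, c :: rest => if c = '%' then toksGo (some []) rest else toksGo none rest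
  | some mid, c :: rest =>
      if c = '%' then ('%' :: mid ++ ['%']) :: toksGo none rest
      else toksGo (some (mid ++ [c])) rest

-- B's pairing loop on the char-list level
def collectC : List (List Char) → List (List Char)
  | _ :: p1 :: p2 :: rest => ('%' :: p1 ++ ['%']) :: collectC (p2 :: rest)
  | _ => []

theorem splitOn_go_eq : ∀ (fuel : Nat) (l cur : List Char) (acc : List (List Char)),
    l.length ≤ fuel →
    PySem.Chars.splitOn.go ['%'] fuel l cur acc = acc.reverse ++ mySplit cur.reverse l := by
  intro fuel
  induction fuel with
  | zero =>
    intro l cur acc h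
    have : l = [] := List.length_eq_zero_iff.mp (Nat.le_zero.mp h)
    subst this
    simp [PySem.Chars.splitOn.go, mySplit]
  | succ n ih =>
    intro l cur acc h
    cases l with
    | nil => simp [PySem.Chars.splitOn.go, mySplit]
    | cons c rest =>
      rw [PySem.Chars.splitOn.go]
      by_cases hc : c = '%'
      · subst hc
        simp only [List.isPrefixOf, Bool.and_true, beq_self_eq_true, if_pos, List.length_cons,
          List.drop_succ_cons, List.drop_zero, List.length_nil]
        rw [ih rest [] (cur.reverse :: acc) (by simpa using Nat.le_of_succ_le_succ h)]
        simp [mySplit]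
      · have hp : List.isPrefixOf ['%'] (c :: rest) = false := by
          simp [List.isPrefixOf]; exact fun h => absurd h.symm hc
        simp only [hp, Bool.false_eq_true, if_false]
        rw [ih rest (c :: cur) acc (by simpa using Nat.le_of_succ_le_succ h)]
        simp [mySplit, hc]

theorem splitOn_eq (cs : List Char) : PySem.Chars.splitOn cs ['%'] = mySplit [] cs := by
  simpa [PySem.Chars.splitOn] using splitOn_go_eq (cs.length + 1) cs [] [] (by omega)

theorem mySplit_ne_nil (p cs : List Char) : mySplit p cs ≠ [] := by
  induction cs generalizing p with
  | nil => simp [mySplit]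
  | cons c rest ih =>
    by_cases hc : c = '%' <;> simp [mySplit, hc, ih]

-- B's pairing of the split parts computes exactly the scanned tokens
theorem collectC_mySplit (cs : List Char) :
    (∀ p, collectC (mySplit p cs) = toksGo none cs) ∧
    (∀ mid q, collectC (q :: mySplit mid cs) = toksGo (some mid) cs) := by
  induction cs with
  | nil => constructor <;> intros <;> simp [mySplit, collectC, toksGo]
  | cons c rest ih =>
    constructor
    · intro p
      by_cases hc : c = '%'
      · subst hc
        simp only [mySplit, if_pos, toksGo]
        exact ih.2 [] p
      · simp only [mySplit, hc, if_false, toksGo]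
        exact ih.1 (p ++ [c])
    · intro mid q
      by_cases hc : c = '%'
      · subst hc
        simp only [mySplit, if_pos, toksGo]
        obtain ⟨h, t, hht⟩ : ∃ h t, mySplit [] rest = h :: t := by
          cases hms : mySplit ([] : List Char) rest with
          | nil => exact absurd hms (mySplit_ne_nil [] rest)
          | cons h t => exact ⟨h, t, rfl⟩
        rw [hht, collectC, ← hht]
        rw [ih.1 []]
      · simp only [mySplit, hc, if_false, toksGo]
        exact ih.2 (mid ++ [c]) q

theorem altLoop_eq : ∀ (n : Nat) (parts : List String), parts.length ≤ n → ∀ (toks : List String),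
    altLoop toks parts = toks ++ (collectC (parts.map String.toList)).map String.ofList := by
  intro n
  induction n with
  | zero =>
    intro parts h toks
    have : parts = [] := List.length_eq_zero_iff.mp (Nat.le_zero.mp h)
    subst this
    simp [altLoop, collectC]
  | succ n ih =>
    intro parts h toks
    match parts with
    | [] => simp [altLoop, collectC]
    | [p0] => simp [altLoop, collectC]
    | [p0, p1] => simp [altLoop, collectC]
    | p0 :: p1 :: p2 :: rest =>
      rw [altLoop, ih (p2 :: rest) (by simp at h ⊢; omega)]
      simp [collectC]

-- A's loop invariant: from a "closed" state the remaining suffix contributes toksGo none,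
-- from an "open" state (an unmatched '%' at position pre0.length) toksGo (some mid)
theorem aFold_eq (text : String) : ∀ (suffix : List Char),
    (∀ pre (retn : List String), text.toList = pre ++ suffix →
      (List.foldl (aStep text) (retn, -1, -1, (pre.length : Int)) suffix).1
        = retn ++ (toksGo none suffix).map String.ofList) ∧
    (∀ pre0 mid (retn : List String),
      text.toList = pre0 ++ '%' :: (mid ++ suffix) → '%' ∉ mid →
      (List.foldl (aStep text)
          (retn, (pre0.length : Int), -1, ((pre0.length + 1 + mid.length : Nat) : Int)) suffix).1
        = retn ++ (toksGo (some mid) suffix).map String.ofList) := by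
  intro suffix
  induction suffix with
  | nil => constructor <;> intros <;> simp [toksGo]
  | cons c rest ih =>
    constructor
    · intro pre retn h
      by_cases hc : c = '%'
      · subst hc
        have hstep : aStep text (retn, -1, -1, (pre.length : Int)) '%'
            = (retn, (pre.length : Int), -1, (pre.length : Int) + 1) := by
          simp [aStep]
        rw [List.foldl_cons, hstep]
        have h2 : text.toList = pre ++ '%' :: (([] : List Char) ++ rest) := by simpa using h
        have := ih.2 pre [] retn h2 (by simp)
        simp only [List.length_nil] at this
        have hcast : ((pre.length + 1 + 0 : Nat) : Int) = (pre.length : Int) + 1 := by push_cast; ring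
        rw [hcast] at this
        rw [this]
        simp [toksGo]
      · have hstep : aStep text (retn, -1, -1, (pre.length : Int)) c
            = (retn, -1, -1, (pre.length : Int) + 1) := by
          simp [aStep, hc]
        rw [List.foldl_cons, hstep]
        have h2 : text.toList = (pre ++ [c]) ++ rest := by simpa using h
        have := ih.1 (pre ++ [c]) retn h2
        have hcast : (((pre ++ [c]).length : Nat) : Int) = (pre.length : Int) + 1 := by
          simp
        rw [hcast] at this
        rw [this]
        simp [toksGo, hc]
    · intro pre0 mid retn h hmid
      by_cases hc : c = '%'
      · subst hc
        have hs : ¬ ((pre0.length : Int) = -1) := by omega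
        have hgt : ((pre0.length : Int) > -1) := by omega
        have ht : (((pre0.length + 1 + mid.length : Nat) : Int) > -1) := by omega
        have hstep : aStep text
            (retn, (pre0.length : Int), -1, ((pre0.length + 1 + mid.length : Nat) : Int)) '%'
            = (retn ++ [PySem.Str.slice text (some (pre0.length : Int))
                  (some (((pre0.length + 1 + mid.length : Nat) : Int) + 1))],
               -1, -1, ((pre0.length + 1 + mid.length : Nat) : Int) + 1) := by
          simp [aStep, hs, hgt]
          omega
        rw [List.foldl_cons, hstep]
        have hslice : PySem.Str.slice text (some (pre0.length : Int))
              (some (((pre0.length + 1 + mid.length : Nat) : Int) + 1))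
            = String.ofList ('%' :: mid ++ ['%']) := by
          have hb : (((pre0.length + 1 + mid.length : Nat) : Int) + 1)
              = ((pre0.length + (mid.length + 2) : Nat) : Int) := by push_cast; ring
          rw [PySem.Str.slice, hb]
          rw [PySem.Chars.slice_eq_listSlice, PySem.List.slice_natCast]
          congr 1
          rw [h]
          rw [show pre0 ++ '%' :: (mid ++ '%' :: rest)
                = pre0 ++ (('%' :: mid ++ ['%']) ++ rest) by simp]
          rw [List.drop_left' rfl]
          have hlen : pre0.length + (mid.length + 2) - pre0.length
              = ('%' :: mid ++ ['%']).length := by simp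
          rw [hlen, List.take_left]
        have h2 : text.toList = (pre0 ++ '%' :: mid ++ ['%']) ++ rest := by
          rw [h]; simp
        have := ih.1 (pre0 ++ '%' :: mid ++ ['%'])
          (retn ++ [PySem.Str.slice text (some (pre0.length : Int))
              (some (((pre0.length + 1 + mid.length : Nat) : Int) + 1))]) h2
        have hcast : (((pre0 ++ '%' :: mid ++ ['%']).length : Nat) : Int)
            = ((pre0.length + 1 + mid.length : Nat) : Int) + 1 := by
          simp [List.length_append]; omega
        rw [hcast] at this
        rw [this, hslice]
        simp [toksGo]
      · have hstep : aStep text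
            (retn, (pre0.length : Int), -1, ((pre0.length + 1 + mid.length : Nat) : Int)) c
            = (retn, (pre0.length : Int), -1,
               ((pre0.length + 1 + mid.length : Nat) : Int) + 1) := by
          simp [aStep, hc]
        rw [List.foldl_cons, hstep]
        have h2 : text.toList = pre0 ++ '%' :: ((mid ++ [c]) ++ rest) := by
          rw [h]; simp
        have hmid2 : '%' ∉ mid ++ [c] := by
          simp [hmid]
          exact fun hcc => absurd hcc.symm hc
        have := ih.2 pre0 (mid ++ [c]) retn h2 hmid2
        have hcast : (((pre0.length + 1 + (mid ++ [c]).length : Nat) : Int))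
            = ((pre0.length + 1 + mid.length : Nat) : Int) + 1 := by
          simp [List.length_append]; omega
        rw [hcast] at this
        rw [this]
        simp [toksGo, hc]

-- ===== VERDICT (by name: the statement is the Claim_ definition above) =====
theorem get_variables_from_text_spec : Claim_equal_get_variables_from_text := by
  intro text _
  unfold Spec_get_variables_from_text
  unfold get_variables_from_text get_variables_from_text_alt
  have hA : (List.foldl (aStep text) ([], -1, -1, 0) text.toList).1
      = (toksGo none text.toList).map String.ofList := by
    have := (aFold_eq text text.toList).1 [] [] (by simp)
    simpa using this
  have hsp := PySem.Str.split?_map text "%"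
  have hsp2 : PySem.Chars.split? text.toList "%".toList
      = some (mySplit [] text.toList) := by
    rw [show "%".toList = ['%'] from rfl]
    simp [PySem.Chars.split?, splitOn_eq]
  rw [hsp2] at hsp
  cases hq : PySem.Str.split? text "%" with
  | none => rw [hq] at hsp; simp at hsp
  | some q =>
    rw [hq] at hsp
    simp only [Option.map_some, Option.some.injEq] at hsp
    have hB : altLoop [] q = (toksGo none text.toList).map String.ofList := by
      rw [altLoop_eq q.length q le_rfl []]
      rw [hsp, (collectC_mySplit text.toList).1 []]
      simp
    simp only [Option.getD_some]
    rw [hB, hA]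
    cases toksGo none text.toList <;> simp
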